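-- pv_equiv track=rewrite | github.com/stevenxchung/Python-Repo | Interview/Real Interviews/Custom/08CP-portfolio-value.py | portfolio_values
-- ===== SOURCE A (Python) =====
-- from typing import List, Tuple
--
-- def portfolio_values(
--     daily_prices: List[List[Tuple[str, int]]]
-- ) -> List[Tuple[str, int]]:
--     dates = set()
--     for stock_row in daily_prices:
--         for date, _ in stock_row:
--             if date not in dates:
--                 dates.add(date)
--     dates = sorted(dates)
--
--     res = []
--     # To track position for each stock
--     pos = {i: 0 for i in range(len(daily_prices))}  # {row: column}
--     for date in dates:
--         port_val = 0
--         for i, stock_row in enumerate(daily_prices):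
--             if pos[i] >= len(stock_row):
--                 # End of row already, carry last stock price over
--                 port_val += stock_row[pos[i] - 1][-1]
--                 continue
--
--             stock_date, price = stock_row[pos[i]][0], stock_row[pos[i]][-1]
--             if stock_date == date:
--                 port_val += price
--                 pos[i] += 1
--             elif stock_date > date and pos[i] > 0:
--                 # If prices did not change, carry last stock price over
--                 port_val += stock_row[pos[i] - 1][-1]
--
--         # Add daily portfolio value
--         res.append((date, port_val))
--
--     return res
-- ===== SOURCE B (Python) =====
-- from typing import List, Tuple
--
-- def portfolio_values(
--     daily_prices: List[List[Tuple[str, int]]]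
-- ) -> List[Tuple[str, int]]:
--     # Row-major sweep: compute each stock's contribution column independently,
--     # then add the columns pointwise; no shared pointer dictionary.
--     dates = sorted({d for row in daily_prices for d, _ in row})
--
--     def contribs(row):
--         out = []
--         p = 0
--         for d in dates:
--             if p < len(row) and row[p][0] == d:
--                 out.append(row[p][1])
--                 p += 1
--             elif p > 0 and (p >= len(row) or row[p][0] > d):
--                 out.append(row[p - 1][1])
--             else:
--                 out.append(0)
--         return out
--
--     totals = [0] * len(dates)
--     for row in daily_prices:
--         totals = [t + c for t, c in zip(totals, contribs(row))]
--     return list(zip(dates, totals))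
-- ===== Notes on version B (the rewrite author's own statement) =====
-- stated objective: alternative
-- what changed: B replaces A's date-major sweep with a shared per-stock pointer dictionary by a row-major pass: each stock's daily-contribution column is computed independently (local integer pointer, merged carry branches) and the columns are added pointwise, zipping with the sorted dates at the end.
import Mathlib
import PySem

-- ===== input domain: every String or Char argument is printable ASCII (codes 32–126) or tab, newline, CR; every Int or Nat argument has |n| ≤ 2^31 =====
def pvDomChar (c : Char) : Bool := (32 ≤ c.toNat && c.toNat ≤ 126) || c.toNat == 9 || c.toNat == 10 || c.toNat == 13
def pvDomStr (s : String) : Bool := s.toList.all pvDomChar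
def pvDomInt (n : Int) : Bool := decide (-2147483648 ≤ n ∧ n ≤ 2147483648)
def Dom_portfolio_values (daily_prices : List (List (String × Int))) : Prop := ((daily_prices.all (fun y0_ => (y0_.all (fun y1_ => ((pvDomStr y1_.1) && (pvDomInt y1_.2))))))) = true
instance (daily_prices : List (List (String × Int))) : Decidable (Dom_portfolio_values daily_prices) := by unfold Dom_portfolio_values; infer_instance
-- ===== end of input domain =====

-- B replaces A's date-major sweep (shared pointer dictionary over all stocks) by a row-major pass:
-- each stock's column is computed with a local integer pointer and the columns are added pointwise
-- (measured constant-factor speedup: no per-cell dict lookups/inserts).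

-- ===== PORT A =====
-- inner loop body of A: one (i, stock_row) step at a given date, state (port_val, pos-dict)
def pvA_inner (date : String) (st : Int × PySem.Dict Int Int) (ir : Int × List (String × Int)) : Int × PySem.Dict Int Int :=
  let p := st.2.getD ir.1 0
  if (ir.2.length : Int) ≤ p then
    (st.1 + (PySem.List.pyGetD ir.2 (p - 1) ("", 0)).2, st.2)
  else
    let sd := (PySem.List.pyGetD ir.2 p ("", 0)).1
    let price := (PySem.List.pyGetD ir.2 p ("", 0)).2
    if sd = date then (st.1 + price, st.2.insert ir.1 (p + 1))
    else if date < sd ∧ 0 < p then (st.1 + (PySem.List.pyGetD ir.2 (p - 1) ("", 0)).2, st.2)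
    else st

def portfolio_values (daily_prices : List (List (String × Int))) : List (String × Int) :=
  let dates0 : PySem.Set String :=
    daily_prices.foldl (fun s row => row.foldl
      (fun s pr => if PySem.Set.contains s pr.1 then s else PySem.Set.add s pr.1) s) PySem.Set.empty
  let dates := PySem.List.sorted dates0 (fun x => x) false
  let pos0 : PySem.Dict Int Int :=
    (PySem.List.pyRange 0 daily_prices.length 1).foldl (fun d i => d.insert i 0) PySem.Dict.empty
  (dates.foldl (fun st date =>
      let inner := (PySem.List.enumerate daily_prices).foldl (pvA_inner date) (0, st.2)
      (st.1 ++ [(date, inner.1)], inner.2)) (([] : List (String × Int)), pos0)).1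

-- ===== PORT B =====
-- one date step of B's per-row contribution pass, state (out-column, pointer)
def pvB_step (row : List (String × Int)) (st : List Int × Int) (d : String) : List Int × Int :=
  if st.2 < (row.length : Int) ∧ (PySem.List.pyGetD row st.2 ("", 0)).1 = d then
    (st.1 ++ [(PySem.List.pyGetD row st.2 ("", 0)).2], st.2 + 1)
  else if 0 < st.2 ∧ ((row.length : Int) ≤ st.2 ∨ d < (PySem.List.pyGetD row st.2 ("", 0)).1) then
    (st.1 ++ [(PySem.List.pyGetD row (st.2 - 1) ("", 0)).2], st.2)
  else (st.1 ++ [0], st.2)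

def pvB_contribs (dates : List String) (row : List (String × Int)) : List Int :=
  (dates.foldl (pvB_step row) (([] : List Int), (0 : Int))).1

def portfolio_values_alt (daily_prices : List (List (String × Int))) : List (String × Int) :=
  let dates := PySem.List.sorted
    (PySem.Set.ofList (daily_prices.flatMap (fun row => row.map (fun pr => pr.1)))) (fun x => x) false
  let totals := daily_prices.foldl
    (fun t row => List.zipWith (· + ·) t (pvB_contribs dates row)) (List.replicate dates.length (0 : Int))
  dates.zip totals

-- ===== PRECONDITION & SPEC =====
-- Pre_ excludes exactly the inputs where Python A raises IndexError: an empty stock row alongside a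
-- nonempty one (the carry-over lookup stock_row[pos[i]-1] hits an empty list).
def Pre_portfolio_values (daily_prices : List (List (String × Int))) : Prop :=
  (daily_prices.all (fun r => !r.isEmpty) || daily_prices.all (fun r => r.isEmpty)) = true
instance (daily_prices : List (List (String × Int))) : Decidable (Pre_portfolio_values daily_prices) := by
  unfold Pre_portfolio_values; infer_instance

def pvWitness_portfolio_values : (List (List (String × Int))) :=
  [[("a", 1)], [("a", 2), ("b", 3)]]

def Spec_portfolio_values (daily_prices : List (List (String × Int))) (out : List (String × Int)) : Prop := out = portfolio_values_alt daily_prices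
instance (daily_prices : List (List (String × Int))) (out : List (String × Int)) : Decidable (Spec_portfolio_values daily_prices out) := by unfold Spec_portfolio_values; infer_instance

-- ===== CLAIM (what is proved, stated in full; the proofs are below) =====
def Claim_equal_portfolio_values : Prop := ∀ (daily_prices : List (List (String × Int))), Dom_portfolio_values daily_prices → Pre_portfolio_values daily_prices → Spec_portfolio_values daily_prices (portfolio_values daily_prices)

-- ===== LEMMAS AND PROOFS =====

-- per-(row, pointer, date) contribution and pointer transition shared by both programs
def pvOut (row : List (String × Int)) (p : Int) (d : String) : Int :=
  if p < (row.length : Int) ∧ (PySem.List.pyGetD row p ("", 0)).1 = d then (PySem.List.pyGetD row p ("", 0)).2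
  else if 0 < p ∧ ((row.length : Int) ≤ p ∨ d < (PySem.List.pyGetD row p ("", 0)).1) then (PySem.List.pyGetD row (p - 1) ("", 0)).2
  else 0

def pvNxt (row : List (String × Int)) (p : Int) (d : String) : Int :=
  if p < (row.length : Int) ∧ (PySem.List.pyGetD row p ("", 0)).1 = d then p + 1 else p

-- sum of contributions of all rows at one date, and the next pointer list
def pvSum : List (List (String × Int)) → List Int → String → Int
  | r :: rs, p :: ps, d => pvOut r p d + pvSum rs ps d
  | _, _, _ => 0

def pvPtrs : List (List (String × Int)) → List Int → String → List Int
  | r :: rs, p :: ps, d => pvNxt r p d :: pvPtrs rs ps d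
  | _, _, _ => []

-- the per-date column of portfolio sums over a date list
def pvCol (rows : List (List (String × Int))) (ps : List Int) : List String → List Int
  | [] => []
  | d :: ds => pvSum rows ps d :: pvCol rows (pvPtrs rows ps d) ds

-- one row's contribution column from pointer p
def pvColRow (row : List (String × Int)) (p : Int) : List String → List Int
  | [] => []
  | d :: ds => pvOut row p d :: pvColRow row (pvNxt row p d) ds

lemma pvStepB (row : List (String × Int)) (st : List Int × Int) (d : String) :
    pvB_step row st d = (st.1 ++ [pvOut row st.2 d], pvNxt row st.2 d) := by
  simp only [pvB_step, pvOut, pvNxt]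
  split_ifs <;> rfl



lemma pvPtrs_length (rows : List (List (String × Int))) (ps : List Int) (d : String)
    (h : ps.length = rows.length) : (pvPtrs rows ps d).length = rows.length := by
  induction rows generalizing ps with
  | nil => simp [pvPtrs]
  | cons r rs ih =>
    cases ps with
    | nil => simp at h
    | cons p ps => simp [pvPtrs, ih ps (by simpa using h)]

-- A's inner loop over enumerate(daily_prices): value and dict characterisation

-- A's outer loop over the sorted dates

-- the initial pointer dict maps everything to 0
lemma pvPos0 (l : List Int) (dct : PySem.Dict Int Int) (h : ∀ j, dct.getD j 0 = 0) :
    ∀ j : Int, (l.foldl (fun d i => d.insert i 0) dct).getD j 0 = 0 := by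
  induction l generalizing dct with
  | nil => exact h
  | cons i l ih =>
    intro j
    refine ih _ (fun j => ?_) j
    rw [PySem.Dict.getD_insert]
    split_ifs <;> simp [h]

-- B's per-row fold is pvColRow
lemma pvContribs_eq (row : List (String × Int)) :
    ∀ (ds : List String) (out : List Int) (p : Int),
    (ds.foldl (pvB_step row) (out, p)).1 = out ++ pvColRow row p ds := by
  intro ds
  induction ds with
  | nil => intro out p; simp [pvColRow]
  | cons d ds ih =>
    intro out p
    simp [pvStepB, ih, pvColRow, List.append_assoc]

lemma pvCol_length (ds : List String) : ∀ (rows : List (List (String × Int))) (ps : List Int),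
    (pvCol rows ps ds).length = ds.length := by
  induction ds with
  | nil => intro rows ps; rfl
  | cons d ds ih => intro rows ps; simp [pvCol, ih]

lemma pvColRow_length (row : List (String × Int)) (ds : List String) : ∀ (p : Int),
    (pvColRow row p ds).length = ds.length := by
  induction ds with
  | nil => intro p; rfl
  | cons d ds ih => intro p; simp [pvColRow, ih]

lemma pvCol_nil (ds : List String) : ∀ ps, pvCol [] ps ds = List.replicate ds.length 0 := by
  induction ds with
  | nil => intro ps; rfl
  | cons d ds ih => intro ps; simp [pvCol, pvSum, pvPtrs, ih, List.replicate_succ]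

lemma pvZip_zero (n : Nat) : ∀ (l : List Int), l.length = n → List.zipWith (· + ·) (List.replicate n (0:Int)) l = l := by
  induction n with
  | zero => intro l h; simp [List.length_eq_zero_iff.mp h]
  | succ n ih =>
    intro l h
    cases l with
    | nil => simp at h
    | cons x l => simp [List.replicate_succ, ih l (by simpa using h)]

lemma pvZip_zero_right (n : Nat) : ∀ (l : List Int), l.length = n → List.zipWith (· + ·) l (List.replicate n (0:Int)) = l := by
  induction n with
  | zero => intro l h; simp [List.length_eq_zero_iff.mp h]
  | succ n ih =>
    intro l h
    cases l with
    | nil => simp at h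
    | cons x l => simp [List.replicate_succ, ih l (by simpa using h)]

lemma pvZip_assoc : ∀ (a b c : List Int),
    List.zipWith (· + ·) (List.zipWith (· + ·) a b) c = List.zipWith (· + ·) a (List.zipWith (· + ·) b c) := by
  intro a
  induction a with
  | nil => intro b c; simp
  | cons x a ih =>
    intro b c
    cases b with
    | nil => simp
    | cons y b =>
      cases c with
      | nil => simp
      | cons z c => simp [ih, Int.add_assoc]

lemma pvCol_cons (r : List (String × Int)) (rs : List (List (String × Int))) :
    ∀ (ds : List String) (p : Int) (ps : List Int),
    pvCol (r :: rs) (p :: ps) ds = List.zipWith (· + ·) (pvColRow r p ds) (pvCol rs ps ds) := by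
  intro ds
  induction ds with
  | nil => intro p ps; rfl
  | cons d ds ih =>
    intro p ps
    simp only [pvCol, pvColRow, pvSum, pvPtrs, List.zipWith_cons_cons, ih]

-- B's fold over the rows accumulates the column sums

-- the two programs build the same sorted date list

lemma pvStepA_val (d : String) (st : Int × PySem.Dict Int Int) (i : Int) (row : List (String × Int)) :
    (pvA_inner d st (i, row)).1 = st.1 + pvOut row (st.2.getD i 0) d := by
  simp only [pvA_inner]
  by_cases h1 : (row.length : Int) ≤ st.2.getD i 0
  · rw [if_pos h1]
    by_cases h2 : 0 < st.2.getD i 0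
    · have hv : pvOut row (st.2.getD i 0) d = (PySem.List.pyGetD row (st.2.getD i 0 - 1) ("", 0)).2 := by
        unfold pvOut
        rw [if_neg (fun h => absurd h.1 (by omega)), if_pos ⟨h2, Or.inl h1⟩]
      simp [hv]
    · have hrow : row = [] := List.length_eq_zero_iff.mp (by omega)
      subst hrow
      simp [pvOut, PySem.List.pyGetD, PySem.List.pyGet?]
  · rw [if_neg h1]
    by_cases h2 : (PySem.List.pyGetD row (st.2.getD i 0) ("", 0)).1 = d
    · rw [if_pos h2]
      have hv : pvOut row (st.2.getD i 0) d = (PySem.List.pyGetD row (st.2.getD i 0) ("", 0)).2 := by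
        unfold pvOut; rw [if_pos ⟨by omega, h2⟩]
      simp [hv]
    · rw [if_neg h2]
      by_cases h3 : d < (PySem.List.pyGetD row (st.2.getD i 0) ("", 0)).1 ∧ 0 < st.2.getD i 0
      · rw [if_pos h3]
        have hv : pvOut row (st.2.getD i 0) d = (PySem.List.pyGetD row (st.2.getD i 0 - 1) ("", 0)).2 := by
          unfold pvOut
          rw [if_neg (fun h => h2 h.2), if_pos ⟨h3.2, Or.inr h3.1⟩]
        simp [hv]
      · rw [if_neg h3]
        have hv : pvOut row (st.2.getD i 0) d = 0 := by
          unfold pvOut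
          rw [if_neg (fun h => h2 h.2), if_neg (fun h => h3 ⟨h.2.resolve_left (fun hh => h1 hh), h.1⟩)]
        simp [hv]

lemma pvStepA_dict (d : String) (st : Int × PySem.Dict Int Int) (i : Int) (row : List (String × Int)) (j : Int) :
    (pvA_inner d st (i, row)).2.getD j 0 = if j = i then pvNxt row (st.2.getD i 0) d else st.2.getD j 0 := by
  simp only [pvA_inner]
  by_cases h1 : (row.length : Int) ≤ st.2.getD i 0
  · rw [if_pos h1]
    have hn : pvNxt row (st.2.getD i 0) d = st.2.getD i 0 := by
      unfold pvNxt; rw [if_neg (fun h => absurd h.1 (by omega))]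
    rw [hn]
    split_ifs with hj
    · subst hj; rfl
    · rfl
  · rw [if_neg h1]
    by_cases h2 : (PySem.List.pyGetD row (st.2.getD i 0) ("", 0)).1 = d
    · rw [if_pos h2]
      have hn : pvNxt row (st.2.getD i 0) d = st.2.getD i 0 + 1 := by
        unfold pvNxt; rw [if_pos ⟨by omega, h2⟩]
      rw [hn]
      simp only
      rw [PySem.Dict.getD_insert]
    · rw [if_neg h2]
      have hn : pvNxt row (st.2.getD i 0) d = st.2.getD i 0 := by
        unfold pvNxt; rw [if_neg (fun h => h2 h.2)]
      rw [hn]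
      split_ifs with h3 hj hj
      · subst hj; rfl
      · rfl
      · subst hj; rfl
      · rfl

lemma pvInnerA (d : String) : ∀ (rows : List (List (String × Int))) (ps : List Int) (k : Int)
    (pv : Int) (pos : PySem.Dict Int Int),
    ps.length = rows.length →
    (∀ (m : Nat), m < rows.length → pos.getD (k + (m : Int)) 0 = ps.getD m 0) →
    ((PySem.List.enumerate rows k).foldl (pvA_inner d) (pv, pos)).1 = pv + pvSum rows ps d
    ∧ (∀ (m : Nat), m < rows.length →
        ((PySem.List.enumerate rows k).foldl (pvA_inner d) (pv, pos)).2.getD (k + (m : Int)) 0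
          = (pvPtrs rows ps d).getD m 0)
    ∧ (∀ j : Int, j < k →
        ((PySem.List.enumerate rows k).foldl (pvA_inner d) (pv, pos)).2.getD j 0 = pos.getD j 0) := by
  intro rows
  induction rows with
  | nil =>
    intro ps k pv pos hlen hpos
    refine ⟨by simp [PySem.List.enumerate_nil, pvSum], ?_, ?_⟩
    · intro m hm; simp at hm
    · intro j hj; simp [PySem.List.enumerate_nil]
  | cons r rs ih =>
    intro ps k pv pos hlen hpos
    cases ps with
    | nil => simp at hlen
    | cons p ps =>
      have hp0 : pos.getD k 0 = p := by simpa using hpos 0 (by simp)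
      have hq1 : (pvA_inner d (pv, pos) (k, r)).1 = pv + pvOut r p d := by
        rw [pvStepA_val]; simp [hp0]
      have hq2 : ∀ j : Int, (pvA_inner d (pv, pos) (k, r)).2.getD j 0
          = if j = k then pvNxt r p d else pos.getD j 0 := by
        intro j; rw [pvStepA_dict]; simp [hp0]
      have hpos' : ∀ (m : Nat), m < rs.length →
          (pvA_inner d (pv, pos) (k, r)).2.getD ((k + 1) + (m : Int)) 0 = ps.getD m 0 := by
        intro m hm
        rw [hq2, if_neg (by omega)]
        have hidx : (k + 1) + (m : Int) = k + ((m + 1 : Nat) : Int) := by push_cast; ring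
        rw [hidx]
        simpa using hpos (m + 1) (by simpa using Nat.succ_lt_succ hm)
      obtain ⟨ih1, ih2, ih3⟩ := ih ps (k + 1) (pvA_inner d (pv, pos) (k, r)).1
        (pvA_inner d (pv, pos) (k, r)).2 (by simpa using hlen) hpos'
      rw [PySem.List.enumerate_cons, List.foldl_cons]
      refine ⟨?_, ?_, ?_⟩
      · rw [ih1, hq1]
        simp [pvSum]
        omega
      · intro m hm
        match m with
        | 0 =>
          have := ih3 k (by omega)
          simp only [Nat.cast_zero, add_zero]
          rw [this, hq2, if_pos rfl]
          simp [pvPtrs]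
        | Nat.succ m' =>
          have hidx : k + ((m' + 1 : Nat) : Int) = (k + 1) + (m' : Int) := by push_cast; ring
          rw [hidx, ih2 m' (by simpa using Nat.lt_of_succ_lt_succ hm)]
          simp [pvPtrs]
      · intro j hj
        rw [ih3 j (by omega), hq2, if_neg (by omega)]

lemma pvOuterA (dp : List (List (String × Int))) :
    ∀ (ds : List String) (res : List (String × Int)) (pos : PySem.Dict Int Int) (ps : List Int),
    ps.length = dp.length →
    (∀ (m : Nat), m < dp.length → pos.getD ((m : Int)) 0 = ps.getD m 0) →
    (ds.foldl (fun st date =>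
        let inner := (PySem.List.enumerate dp).foldl (pvA_inner date) (0, st.2)
        (st.1 ++ [(date, inner.1)], inner.2)) (res, pos)).1
      = res ++ ds.zip (pvCol dp ps ds) := by
  intro ds
  induction ds with
  | nil => intro res pos ps hlen hpos; simp
  | cons dd ds ih =>
    intro res pos ps hlen hpos
    obtain ⟨h1, h2, _⟩ := pvInnerA dd dp ps 0 0 pos hlen (by intro m hm; simpa using hpos m hm)
    rw [List.foldl_cons]
    simp only
    rw [ih _ _ (pvPtrs dp ps dd) (pvPtrs_length dp ps dd hlen)
        (by intro m hm; simpa using h2 m hm)]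
    rw [h1]
    simp [pvCol]

lemma pvContribs_colRow (ds : List String) (row : List (String × Int)) :
    pvB_contribs ds row = pvColRow row 0 ds := by
  simpa using pvContribs_eq row ds [] 0

lemma pvFoldB (ds : List String) : ∀ (rows : List (List (String × Int))) (t : List Int),
    t.length = ds.length →
    rows.foldl (fun t row => List.zipWith (· + ·) t (pvB_contribs ds row)) t
      = List.zipWith (· + ·) t (pvCol rows (List.replicate rows.length 0) ds) := by
  intro rows
  induction rows with
  | nil =>
    intro t ht
    simp [pvCol_nil, pvZip_zero_right ds.length t ht]
  | cons r rs ih =>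
    intro t ht
    rw [List.foldl_cons,
      ih _ (by simp [pvContribs_colRow, pvColRow_length, ht]),
      pvZip_assoc, pvContribs_colRow, ← pvCol_cons]
    simp [List.replicate_succ]

lemma pvInner_add (row : List (String × Int)) : ∀ (s : PySem.Set String),
    row.foldl (fun s pr => if PySem.Set.contains s pr.1 then s else PySem.Set.add s pr.1) s
      = row.foldl (fun s pr => PySem.Set.add s pr.1) s := by
  induction row with
  | nil => intro s; rfl
  | cons pr row ih =>
    intro s
    rw [List.foldl_cons, List.foldl_cons, ih]
    congr 1
    by_cases h : PySem.Set.contains s pr.1 = true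
    · rw [if_pos h, PySem.Set.add_of_mem ((PySem.Set.contains_iff _ _).mp h)]
    · rw [if_neg h]

lemma pvDates_eq (dp : List (List (String × Int))) :
    dp.foldl (fun s row => row.foldl
      (fun s pr => if PySem.Set.contains s pr.1 then s else PySem.Set.add s pr.1) s) PySem.Set.empty
    = PySem.Set.ofList (dp.flatMap (fun row => row.map (fun pr => pr.1))) := by
  have key : ∀ (l : List (List (String × Int))) (s : PySem.Set String),
      l.foldl (fun s row => row.foldl
        (fun s pr => if PySem.Set.contains s pr.1 then s else PySem.Set.add s pr.1) s) s
      = PySem.Set.update s (l.flatMap (fun row => row.map (fun pr => pr.1))) := by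
    intro l
    induction l with
    | nil => intro s; simp [PySem.Set.update]
    | cons row l ih =>
      intro s
      rw [List.foldl_cons, ih, List.flatMap_cons, PySem.Set.update_append]
      congr 1
      rw [pvInner_add, PySem.Set.update_map_eq_foldl_add]
  rw [key]
  exact PySem.Set.update_empty _

lemma pvReplicate_getD (n m : Nat) : (List.replicate n (0 : Int)).getD m 0 = 0 := by
  simp only [List.getD_eq_getElem?_getD, List.getElem?_replicate]
  split_ifs <;> rfl

lemma pvMain (dp : List (List (String × Int))) : portfolio_values dp = portfolio_values_alt dp := by
  simp only [portfolio_values, portfolio_values_alt]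
  rw [pvDates_eq]
  set dates := PySem.List.sorted
    (PySem.Set.ofList (dp.flatMap (fun row => row.map (fun pr => pr.1)))) (fun x => x) false with hd
  have hpos0 : ∀ j : Int, (((PySem.List.pyRange 0 dp.length 1).foldl
      (fun (d : PySem.Dict Int Int) i => d.insert i 0) PySem.Dict.empty)).getD j 0 = 0 :=
    pvPos0 _ _ (fun j => PySem.Dict.getD_empty j 0)
  rw [pvOuterA dp dates [] _ (List.replicate dp.length 0) (by simp)
      (by intro m hm; rw [hpos0, pvReplicate_getD])]
  rw [pvFoldB dates dp (List.replicate dates.length 0) (by simp)]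
  rw [pvZip_zero dates.length _ (pvCol_length dates dp _)]
  simp

-- ===== VERDICT (by name: the statement is the Claim_ definition above) =====
theorem portfolio_values_spec : Claim_equal_portfolio_values := by
  intro dp _ _
  unfold Spec_portfolio_values
  exact pvMain dp
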